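-- pv_equiv track=rewrite | github.com/marcocanedo2001/ufpr | python/aula02/tupla1.py | analisar_tupla
-- ===== SOURCE A (Python) =====
-- def analisar_tupla(tupla):
--     if not tupla:
--         return None  # Retorna None para tuplas vazias
--
--     menor = tupla[0]
--     maior = tupla[0]
--     soma = 0
--     quantidade = 0
--
--     for numero in tupla:
--         if numero < menor:
--             menor = numero
--         if numero > maior:
--             maior = numero
--         soma += numero
--         quantidade += 1
--
--     return (menor, maior, soma, quantidade)
-- ===== SOURCE B (Python) =====
-- def analisar_tupla(tupla):
--     if not tupla:
--         return None
--     return (min(tupla), max(tupla), sum(tupla), len(tupla))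
-- ===== Notes on version B (the rewrite author's own statement) =====
-- stated objective: idiomatic
-- what changed: Replaces A's single manual accumulation loop (running min/max/sum/count) with the builtin aggregates min/max/sum/len behind the same empty guard.
import Mathlib
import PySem

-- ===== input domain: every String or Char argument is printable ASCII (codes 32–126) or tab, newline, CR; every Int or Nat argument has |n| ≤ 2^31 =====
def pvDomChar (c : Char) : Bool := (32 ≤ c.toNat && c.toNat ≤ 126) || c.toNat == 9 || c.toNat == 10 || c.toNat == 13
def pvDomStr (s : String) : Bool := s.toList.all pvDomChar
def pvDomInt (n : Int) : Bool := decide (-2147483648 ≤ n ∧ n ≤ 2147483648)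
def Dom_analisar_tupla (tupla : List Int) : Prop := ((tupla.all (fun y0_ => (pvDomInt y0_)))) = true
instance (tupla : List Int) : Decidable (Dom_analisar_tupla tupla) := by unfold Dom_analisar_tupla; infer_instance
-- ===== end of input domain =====

-- B computes the same aggregates with the builtin min/max/sum/len instead of A's manual accumulation loop (idiomatic).
-- ===== PORT A =====
-- A's single pass: running (menor, maior, soma, quantidade) updated per element.
def analisar_tupla (tupla : List Int) : Option (List Int) :=
  match tupla with
  | [] => none
  | x :: _ =>
    let r := tupla.foldl
      (fun (st : Int × Int × Int × Int) numero =>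
        let menor := if numero < st.1 then numero else st.1
        let maior := if numero > st.2.1 then numero else st.2.1
        (menor, maior, st.2.2.1 + numero, st.2.2.2 + 1))
      (x, x, 0, 0)
    some [r.1, r.2.1, r.2.2.1, r.2.2.2]

-- ===== PORT B =====
-- B: empty guard, then builtin aggregates (min/max via PySem.List.min?/max?, sum, len).
def analisar_tupla_alt (tupla : List Int) : Option (List Int) :=
  if tupla = [] then none
  else
    some [(PySem.List.min? tupla (fun y => y)).getD 0,
          (PySem.List.max? tupla (fun y => y)).getD 0,
          tupla.sum, (tupla.length : Int)]

-- ===== PRECONDITION & SPEC =====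
def Spec_analisar_tupla (tupla : List Int) (out : Option (List Int)) : Prop := out = analisar_tupla_alt tupla
instance (tupla : List Int) (out : Option (List Int)) : Decidable (Spec_analisar_tupla tupla out) := by unfold Spec_analisar_tupla; infer_instance

-- ===== CLAIM (what is proved, stated in full; the proofs are below) =====
def Claim_equal_analisar_tupla : Prop := ∀ (tupla : List Int), Dom_analisar_tupla tupla → Spec_analisar_tupla tupla (analisar_tupla tupla)

-- ===== LEMMAS AND PROOFS =====

-- ===== VERDICT (by name: the statement is the Claim_ definition above) =====
lemma analisar_loop (xs : List Int) (m M s q : Int) :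
    xs.foldl
      (fun (st : Int × Int × Int × Int) numero =>
        let menor := if numero < st.1 then numero else st.1
        let maior := if numero > st.2.1 then numero else st.2.1
        (menor, maior, st.2.2.1 + numero, st.2.2.2 + 1))
      (m, M, s, q)
    = (xs.foldl min m, xs.foldl max M, s + xs.sum, q + xs.length) := by
  induction xs generalizing m M s q with
  | nil => simp
  | cons x t ih =>
    have h1 : (if x < m then x else m) = min m x := by rw [min_def]; split_ifs <;> omega
    have h2 : (if x > M then x else M) = max M x := by rw [max_def]; split_ifs <;> omega
    simp only [List.foldl_cons, List.sum_cons, List.length_cons, ih, h1, h2]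
    refine congrArg₂ _ rfl (congrArg₂ _ rfl (congrArg₂ _ ?_ ?_)) <;> push_cast <;> ring

theorem analisar_tupla_spec : Claim_equal_analisar_tupla := by
  intro tupla _
  unfold Spec_analisar_tupla analisar_tupla analisar_tupla_alt
  match tupla with
  | [] => rfl
  | x :: t =>
    simp only [analisar_loop, List.foldl_cons, lt_irrefl, if_false, gt_iff_lt,
      PySem.List.min?_id_cons, PySem.List.max?_id_cons, List.sum_cons,
      List.length_cons, if_neg (List.cons_ne_nil x t), Option.getD_some]
    push_cast
    ring_nf
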